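-- pv_equiv track=rewrite | github.com/andrewrong/stocks | python/alert/alert_func.py | direction_threshold
-- ===== SOURCE A (Python) =====
-- def direction_threshold(a: list, b: list, exp: str) -> (bool, int):
--     c, d = a, b
--     if exp == 'A down B':
--         c, d = b, a
--     for i, (x, y) in enumerate(zip(c, d)):
--         if x >= y:
--             # 找到了第一个上传的标识,如果是第一数据，那么就continue，继续找
--             if i == 0:
--                 continue
--             if c[i - 1] < d[i - 1]:
--                 return True, i
--     return False, 0
-- ===== SOURCE B (Python) =====
-- def direction_threshold(a: list, b: list, exp: str) -> (bool, int):
--     c, d = (b, a) if exp == 'A down B' else (a, b)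
--     n = min(len(c), len(d))
--     # phase 1: find j, the first index where c dips below d (end of the leading "above" run)
--     j = 0
--     while j < n and c[j] >= d[j]:
--         j += 1
--     # phase 2: find the first index after j where c comes back above d
--     k = j + 1
--     while k < n and c[k] < d[k]:
--         k += 1
--     if k < n:
--         return True, k
--     return False, 0
-- ===== Notes on version B (the rewrite author's own statement) =====
-- stated objective: alternative
-- what changed: B replaces A's fused scan with adjacent-pair re-indexing (c[i-1] < d[i-1]) by a two-phase pointer search: first locate j, the first index where c dips below d, then locate the first index k > j where c is back above d; the crossing condition on adjacent indices disappears entirely.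
import Mathlib
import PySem

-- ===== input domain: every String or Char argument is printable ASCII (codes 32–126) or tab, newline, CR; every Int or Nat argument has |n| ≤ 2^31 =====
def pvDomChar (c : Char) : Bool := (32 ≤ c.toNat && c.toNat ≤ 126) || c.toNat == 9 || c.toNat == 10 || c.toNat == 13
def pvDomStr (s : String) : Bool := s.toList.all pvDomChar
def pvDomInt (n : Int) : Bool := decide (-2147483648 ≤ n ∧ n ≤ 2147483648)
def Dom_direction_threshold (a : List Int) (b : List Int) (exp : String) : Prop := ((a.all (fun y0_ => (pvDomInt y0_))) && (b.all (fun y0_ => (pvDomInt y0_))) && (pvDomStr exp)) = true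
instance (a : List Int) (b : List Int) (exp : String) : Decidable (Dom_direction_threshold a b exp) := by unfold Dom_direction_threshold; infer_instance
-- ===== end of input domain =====

-- B replaces A's fused adjacent-pair crossing scan by a two-phase pointer search (first dip, then first recovery); same cost, different algorithmic decomposition.
-- ===== PORT A =====
-- the fused loop: enumerate(zip(c,d)) with counter i; c[i-1]/d[i-1] are always in range when read (i ≥ 1,
-- i < len(zip) ≤ len c, len d), so List.getD is exact here.
def dtLoopA (c : List Int) (d : List Int) (i : Nat) : List (Int × Int) → Bool × Int
  | [] => (false, 0)
  | (x, y) :: rest =>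
    if x ≥ y then
      if i = 0 then dtLoopA c d (i + 1) rest
      else if c.getD (i - 1) 0 < d.getD (i - 1) 0 then (true, (i : Int))
      else dtLoopA c d (i + 1) rest
    else dtLoopA c d (i + 1) rest

def direction_threshold (a : List Int) (b : List Int) (exp : String) : Bool × Int :=
  let cd := if exp = "A down B" then (b, a) else (a, b)
  dtLoopA cd.1 cd.2 0 (cd.1.zip cd.2)

-- ===== PORT B =====
-- phase 1 of Source B: `while j < n and c[j] >= d[j]: j += 1` (indices < n are in range, so getD is exact)
def dtFindBelow (c : List Int) (d : List Int) (n : Nat) (j : Nat) : Nat :=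
  if j < n ∧ c.getD j 0 ≥ d.getD j 0 then dtFindBelow c d n (j + 1) else j
termination_by n - j
decreasing_by omega

-- phase 2 of Source B: `while k < n and c[k] < d[k]: k += 1`
def dtFindAbove (c : List Int) (d : List Int) (n : Nat) (k : Nat) : Nat :=
  if k < n ∧ c.getD k 0 < d.getD k 0 then dtFindAbove c d n (k + 1) else k
termination_by n - k
decreasing_by omega

def direction_threshold_alt (a : List Int) (b : List Int) (exp : String) : Bool × Int :=
  let cd := if exp = "A down B" then (b, a) else (a, b)
  let n := min cd.1.length cd.2.length
  let j := dtFindBelow cd.1 cd.2 n 0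
  let k := dtFindAbove cd.1 cd.2 n (j + 1)
  if k < n then (true, (k : Int)) else (false, 0)

-- ===== PRECONDITION & SPEC =====
def Spec_direction_threshold (a : List Int) (b : List Int) (exp : String) (out : Bool × Int) : Prop := out = direction_threshold_alt a b exp
instance (a : List Int) (b : List Int) (exp : String) (out : Bool × Int) : Decidable (Spec_direction_threshold a b exp out) := by unfold Spec_direction_threshold; infer_instance

-- ===== CLAIM (what is proved, stated in full; the proofs are below) =====
def Claim_equal_direction_threshold : Prop := ∀ (a : List Int) (b : List Int) (exp : String), Dom_direction_threshold a b exp → Spec_direction_threshold a b exp (direction_threshold a b exp)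

-- ===== LEMMAS AND PROOFS =====
theorem zip_getD (c d : List Int) (j : Nat) (hj : j < (c.zip d).length) :
    (c.zip d).getD j (0, 0) = (c.getD j 0, d.getD j 0) := by
  have h1 : j < c.length := by simp at hj; omega
  have h2 : j < d.length := by simp at hj; omega
  rw [List.getD_eq_getElem _ _ hj, List.getD_eq_getElem _ _ h1, List.getD_eq_getElem _ _ h2]
  simp

theorem dtFindAbove_ge (c d : List Int) (n k : Nat) : k ≤ dtFindAbove c d n k := by
  rw [dtFindAbove]
  split_ifs with h
  · have := dtFindAbove_ge c d n (k + 1); omega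
  · omega
termination_by n - k
decreasing_by omega

-- phase 2: once the previous pair was a dip (c[j-1] < d[j-1]), A's remaining loop is B's recovery search
theorem dt_phase2 (c d : List Int) (j : Nat) (hj : 1 ≤ j)
    (hprev : ¬ c.getD (j - 1) 0 ≥ d.getD (j - 1) 0) :
    dtLoopA c d j ((c.zip d).drop j)
      = (if dtFindAbove c d (c.zip d).length j < (c.zip d).length
         then (true, (dtFindAbove c d (c.zip d).length j : Int)) else (false, 0)) := by
  by_cases h : j < (c.zip d).length
  · have hdrop : (c.zip d).drop j = (c.zip d).getD j (0, 0) :: (c.zip d).drop (j + 1) := by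
      rw [List.drop_eq_getElem_cons h, List.getD_eq_getElem _ _ h]
    rw [hdrop, zip_getD c d j h]
    simp only [dtLoopA]
    by_cases hab : c.getD j 0 ≥ d.getD j 0
    · have hstop : dtFindAbove c d (c.zip d).length j = j := by
        rw [dtFindAbove, if_neg (fun hh => absurd hh.2 (not_lt.mpr hab))]
      rw [if_pos hab, if_neg (show ¬ j = 0 by omega), if_pos (lt_of_not_ge hprev),
        hstop, if_pos h]
    · have hstep : dtFindAbove c d (c.zip d).length j
          = dtFindAbove c d (c.zip d).length (j + 1) := by
        conv_lhs => rw [dtFindAbove]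
        rw [if_pos ⟨h, lt_of_not_ge hab⟩]
      rw [if_neg hab, hstep]
      exact dt_phase2 c d (j + 1) (by omega) (by simpa using hab)
  · have hge := dtFindAbove_ge c d (c.zip d).length j
    rw [List.drop_eq_nil_of_le (not_lt.mp h), if_neg (by omega)]
    rfl
termination_by (c.zip d).length - j
decreasing_by omega

-- phase 1: while every pair so far is above, A's loop tracks B's dip search
theorem dt_phase1 (c d : List Int) (j : Nat)
    (hpre : ∀ m, m < j → c.getD m 0 ≥ d.getD m 0) :
    dtLoopA c d j ((c.zip d).drop j)
      = (if dtFindAbove c d (c.zip d).length (dtFindBelow c d (c.zip d).length j + 1) < (c.zip d).length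
         then (true, (dtFindAbove c d (c.zip d).length (dtFindBelow c d (c.zip d).length j + 1) : Int))
         else (false, 0)) := by
  by_cases h : j < (c.zip d).length
  · have hdrop : (c.zip d).drop j = (c.zip d).getD j (0, 0) :: (c.zip d).drop (j + 1) := by
      rw [List.drop_eq_getElem_cons h, List.getD_eq_getElem _ _ h]
    rw [hdrop, zip_getD c d j h]
    simp only [dtLoopA]
    by_cases hab : c.getD j 0 ≥ d.getD j 0
    · have hrec : dtFindBelow c d (c.zip d).length j = dtFindBelow c d (c.zip d).length (j + 1) := by
        conv_lhs => rw [dtFindBelow]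
        rw [if_pos ⟨h, hab⟩]
      have hpre' : ∀ m, m < j + 1 → c.getD m 0 ≥ d.getD m 0 := by
        intro m hm
        rcases Nat.lt_succ_iff_lt_or_eq.mp hm with h' | h'
        · exact hpre m h'
        · subst h'; exact hab
      have ih := dt_phase1 c d (j + 1) hpre'
      rw [hrec, ← ih]
      rcases Nat.eq_zero_or_pos j with hz | hz
      · rw [if_pos hab, if_pos hz]
      · rw [if_pos hab, if_neg (show ¬ j = 0 by omega),
          if_neg (not_lt.mpr (hpre (j - 1) (by omega)))]
    · rw [if_neg hab]
      have hstop : dtFindBelow c d (c.zip d).length j = j := by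
        conv_lhs => rw [dtFindBelow]
        rw [if_neg (fun hh => hab hh.2)]
      rw [hstop]
      exact dt_phase2 c d (j + 1) (by omega) (by simpa using hab)
  · have hstop : dtFindBelow c d (c.zip d).length j = j := by
      conv_lhs => rw [dtFindBelow]
      rw [if_neg (fun hh => h hh.1)]
    have hge := dtFindAbove_ge c d (c.zip d).length (j + 1)
    rw [List.drop_eq_nil_of_le (not_lt.mp h), hstop, if_neg (by omega)]
    rfl
termination_by (c.zip d).length - j
decreasing_by omega

-- ===== VERDICT (by name: the statement is the Claim_ definition above) =====
theorem direction_threshold_spec : Claim_equal_direction_threshold := by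
  intro a b exp _
  unfold Spec_direction_threshold direction_threshold direction_threshold_alt
  set cd := if exp = "A down B" then (b, a) else (a, b) with hcd
  have hlen : (cd.1.zip cd.2).length = min cd.1.length cd.2.length := List.length_zip
  have h := dt_phase1 cd.1 cd.2 0 (by intro m hm; omega)
  simp only [List.drop_zero] at h
  rw [h, hlen]
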